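-- pv_equiv track=rewrite | github.com/danielewhughes/dissertation | evaluators/semantics/bleu_score.py | split_into_songs
-- ===== SOURCE A (Python) =====
-- def split_into_songs(lines):
--     songs = []
--     current_song = []
--     for line in lines:
--         if line == "*":
--             if current_song:
--                 songs.append(current_song)
--                 current_song = []
--         else:
--             current_song.append(line)
--     if current_song:
--         songs.append(current_song)
--     return songs
-- ===== SOURCE B (Python) =====
-- def split_into_songs(lines):
--     # Run-scanner: skip '*' delimiters, slice out each maximal non-'*' run.
--     songs = []
--     i = 0
--     n = len(lines)
--     while i < n:
--         if lines[i] == "*":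
--             i += 1
--         else:
--             j = i
--             while j < n and lines[j] != "*":
--                 j += 1
--             songs.append(lines[i:j])
--             i = j
--     return songs
-- ===== Notes on version B (the rewrite author's own statement) =====
-- stated objective: alternative
-- what changed: Replaces the accumulator-with-two-flush-sites loop by a two-pointer run scanner that slices each maximal non-'*' run out of the list directly, so no current_song buffer or flush logic exists.
import Mathlib
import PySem

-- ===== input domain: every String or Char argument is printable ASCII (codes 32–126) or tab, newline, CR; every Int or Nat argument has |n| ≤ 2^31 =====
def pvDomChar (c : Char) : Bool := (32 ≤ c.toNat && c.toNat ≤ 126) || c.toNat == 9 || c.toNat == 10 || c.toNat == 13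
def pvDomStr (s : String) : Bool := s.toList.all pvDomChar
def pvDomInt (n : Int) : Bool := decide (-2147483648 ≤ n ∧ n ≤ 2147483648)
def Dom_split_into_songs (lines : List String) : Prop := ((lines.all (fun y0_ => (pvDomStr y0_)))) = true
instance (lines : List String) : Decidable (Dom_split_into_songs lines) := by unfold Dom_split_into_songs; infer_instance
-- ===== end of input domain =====

-- B replaces A's accumulator-and-flush loop by a run scanner (takeWhile/dropWhile over maximal non-'*' runs); alternative decomposition, same cost.


-- ===== PORT A =====
-- fold over the lines carrying (songs, current_song), then the final flush
def split_into_songs (lines : List String) : List (List String) :=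
  let st := lines.foldl
    (fun (st : List (List String) × List String) line =>
      if line = "*" then
        if st.2 ≠ [] then (st.1 ++ [st.2], []) else st
      else (st.1, st.2 ++ [line]))
    ([], [])
  if st.2 ≠ [] then st.1 ++ [st.2] else st.1

-- ===== PORT B =====
-- run scanner: skip '*', otherwise take the maximal non-'*' run and recurse on the rest
def split_into_songs_alt (lines : List String) : List (List String) :=
  match lines with
  | [] => []
  | l :: ls =>
    if l = "*" then split_into_songs_alt ls
    else (l :: ls.takeWhile (fun x => x ≠ "*")) ::
         split_into_songs_alt (ls.dropWhile (fun x => x ≠ "*"))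
termination_by lines.length
decreasing_by
  · simp
  · have := List.length_dropWhile_le (p := fun x => decide (x ≠ "*")) (l := ls)
    simp at this ⊢; omega

-- ===== PRECONDITION & SPEC =====
def Spec_split_into_songs (lines : List String) (out : List (List String)) : Prop := out = split_into_songs_alt lines
instance (lines : List String) (out : List (List String)) : Decidable (Spec_split_into_songs lines out) := by unfold Spec_split_into_songs; infer_instance

-- ===== CLAIM (what is proved, stated in full; the proofs are below) =====
def Claim_equal_split_into_songs : Prop := ∀ (lines : List String), Dom_split_into_songs lines → Spec_split_into_songs lines (split_into_songs lines)

-- ===== LEMMAS AND PROOFS =====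

-- A's loop continued from a pending current_song `cur` (proof-only helper)
def pvG (cur : List String) : List String → List (List String)
  | [] => if cur = [] then [] else [cur]
  | l :: ls =>
    if l = "*" then (if cur = [] then pvG [] ls else cur :: pvG [] ls)
    else pvG (cur ++ [l]) ls

theorem pvG_eq_alt : ∀ (ls : List String) (cur : List String),
    (cur ≠ [] → pvG cur ls =
      (cur ++ ls.takeWhile (fun x => x ≠ "*")) ::
        split_into_songs_alt (ls.dropWhile (fun x => x ≠ "*")))
    ∧ pvG [] ls = split_into_songs_alt ls := by
  intro ls
  induction ls with
  | nil =>
    intro cur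
    constructor
    · intro h; simp [pvG, h, split_into_songs_alt]
    · simp [pvG, split_into_songs_alt]
  | cons l ls ih =>
    intro cur
    by_cases hl : l = "*"
    · subst hl
      constructor
      · intro h
        simp [pvG, h, (ih []).2, List.takeWhile, List.dropWhile, split_into_songs_alt]
      · simp [pvG, (ih []).2, split_into_songs_alt]
    · constructor
      · intro h
        have := ((ih (cur ++ [l])).1 (by simp))
        simp [pvG, hl, this, List.takeWhile, List.dropWhile]
      · have := ((ih [l]).1 (by simp))
        simp [pvG, hl, this, split_into_songs_alt]

def pvStep (st : List (List String) × List String) (line : String) :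
    List (List String) × List String :=
  if line = "*" then
    if st.2 ≠ [] then (st.1 ++ [st.2], []) else st
  else (st.1, st.2 ++ [line])

def pvFinish (st : List (List String) × List String) : List (List String) :=
  if st.2 ≠ [] then st.1 ++ [st.2] else st.1

theorem pvA_eq (lines : List String) :
    split_into_songs lines = pvFinish (lines.foldl pvStep ([], [])) := rfl

theorem pvFoldl_eq : ∀ (ls : List String) (songs : List (List String)) (cur : List String),
    pvFinish (ls.foldl pvStep (songs, cur)) = songs ++ pvG cur ls := by
  intro ls
  induction ls with
  | nil =>
    intro songs cur
    by_cases h : cur = [] <;> simp [pvFinish, pvG, h]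
  | cons l ls ih =>
    intro songs cur
    by_cases hl : l = "*"
    · by_cases hc : cur = [] <;>
        simp [List.foldl_cons, pvStep, hl, hc, ih, pvG]
    · simp [List.foldl_cons, pvStep, hl, ih, pvG]

-- ===== VERDICT (by name: the statement is the Claim_ definition above) =====
theorem split_into_songs_spec : Claim_equal_split_into_songs := by
  intro lines _
  show split_into_songs lines = split_into_songs_alt lines
  rw [pvA_eq, pvFoldl_eq lines [] [], (pvG_eq_alt lines []).2, List.nil_append]
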